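-- pv_equiv track=rewrite | github.com/kurta17/problem-solving | basic of algorithm/DFS.2.cycle.py | count_cycle
-- ===== SOURCE A (Python) =====
-- def count_cycle(g,n):
--     def dfs(v,par):
--         visited[v] = True
--         for i in g[v]:
--             if not visited[i]:
--                 if dfs(i,v):
--                     return True
--             elif i != par:
--                 return True
--         return False
--     visited = [False] * n
--     count = 0
--     for i in range(n):
--         if not visited[i]:
--             if dfs(i,-1):
--                 count += 1
--     return count
-- ===== SOURCE B (Python) =====
-- def count_cycle(g, n):
--     visited = [False] * n
--     def explore(s):
--         # iterative DFS with an explicit stack of (vertex, parent, neighbor-iterator) frames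
--         visited[s] = True
--         stack = [(s, -1, iter(g[s]))]
--         while stack:
--             v, par, it = stack[-1]
--             i = next(it, None)
--             if i is None:
--                 stack.pop()
--             elif not visited[i]:
--                 visited[i] = True
--                 stack.append((i, v, iter(g[i])))
--             elif i != par:
--                 return True
--         return False
--     count = 0
--     for s in range(n):
--         if not visited[s]:
--             if explore(s):
--                 count += 1
--     return count
-- ===== Notes on version B (the rewrite author's own statement) =====
-- stated objective: alternative
-- what changed: Replaces A's recursive DFS with an iterative DFS over an explicit stack of (vertex, parent, remaining-neighbors) frames, preserving visit order and the early abort on cycle detection, so no Python recursion is used.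
-- outside the precondition, e.g. on count_cycle([[0, 5]], 1): A returns 1, B returns 1; on count_cycle([[-1], [0]], 2): A returns 0, B returns 0; on count_cycle([[], [5]], 2): A raises IndexError, B raises IndexError
import Mathlib
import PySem

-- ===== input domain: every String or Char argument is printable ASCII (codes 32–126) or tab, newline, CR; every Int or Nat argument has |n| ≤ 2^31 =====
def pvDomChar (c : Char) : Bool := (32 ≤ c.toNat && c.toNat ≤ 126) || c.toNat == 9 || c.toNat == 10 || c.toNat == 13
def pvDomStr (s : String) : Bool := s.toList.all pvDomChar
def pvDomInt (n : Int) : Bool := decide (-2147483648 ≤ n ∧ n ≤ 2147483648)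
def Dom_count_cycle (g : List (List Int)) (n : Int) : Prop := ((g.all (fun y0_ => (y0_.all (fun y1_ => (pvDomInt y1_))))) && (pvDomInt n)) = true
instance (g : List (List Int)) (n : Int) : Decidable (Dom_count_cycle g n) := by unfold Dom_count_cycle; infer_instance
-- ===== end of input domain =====

-- B rewrites A's recursive DFS as an iterative DFS with an explicit stack of
-- (vertex, parent, remaining-neighbors) frames; same visit order, same early
-- abort on cycle detection, equal return value (objective: alternative).

-- ===== PORT A =====

-- shared small helpers: Python's g[v], visited[i], visited[i] = True
def adjRow (g : List (List Int)) (v : Int) : List Int := (PySem.List.pyGet? g v).getD []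
def visGet (vis : List Bool) (i : Int) : Bool := (PySem.List.pyGet? vis i).getD false
def visSet (vis : List Bool) (i : Int) : List Bool := PySem.List.pySetD vis i true

mutual
/-- A's recursive `dfs(v, par)`: mark `v`, scan `g[v]`.  The fuel only bounds
    recursion depth (one unit per nested call); `n+1` always suffices. -/
def dfsA (g : List (List Int)) (f : Nat) (v par : Int) (vis : List Bool) : Bool × List Bool :=
  match f with
  | 0 => (false, vis)
  | f' + 1 => loopA g f' v par (adjRow g v) (visSet vis v)
termination_by (f, 0)

/-- the `for i in g[v]` loop of A's dfs -/
def loopA (g : List (List Int)) (f : Nat) (v par : Int) (rem : List Int) (vis : List Bool) :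
    Bool × List Bool :=
  match rem with
  | [] => (false, vis)
  | i :: is =>
    if !(visGet vis i) then
      match dfsA g f i v vis with
      | (true, vis') => (true, vis')
      | (false, vis') => loopA g f v par is vis'
    else if i ≠ par then (true, vis)
    else loopA g f v par is vis
termination_by (f, rem.length + 1)
end

def count_cycle (g : List (List Int)) (n : Int) : Int :=
  ((PySem.List.pyRange 0 n 1).foldl
    (fun (st : Int × List Bool) i =>
      if !(visGet st.2 i) then
        match dfsA g (n.toNat + 1) i (-1) st.2 with
        | (true, vis') => (st.1 + 1, vis')
        | (false, vis') => (st.1, vis')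
      else st)
    (0, List.replicate n.toNat false)).1

-- ===== PORT B =====

/-- B's while loop: explicit stack of (vertex, parent, remaining neighbor
    iterator) frames.  Fuel is consumed only when pushing a frame (one unit per
    newly visited vertex); `n` always suffices. -/
def runB (g : List (List Int)) (f : Nat) (stack : List (Int × Int × List Int))
    (vis : List Bool) : Bool × List Bool :=
  match stack with
  | [] => (false, vis)
  | (_, _, []) :: rest => runB g f rest vis
  | (v, par, i :: is) :: rest =>
    if !(visGet vis i) then
      match f with
      | 0 => (false, vis)
      | f' + 1 => runB g f' ((i, v, adjRow g i) :: (v, par, is) :: rest) (visSet vis i)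
    else if i ≠ par then (true, vis)
    else runB g f ((v, par, is) :: rest) vis
termination_by (f, (stack.map (fun fr => fr.2.2.length + 1)).sum)
decreasing_by
  all_goals first
    | (apply Prod.Lex.left; omega)
    | (apply Prod.Lex.right; simp)

/-- B's `explore(s)` -/
def exploreB (g : List (List Int)) (f : Nat) (s : Int) (vis : List Bool) : Bool × List Bool :=
  runB g f [(s, -1, adjRow g s)] (visSet vis s)

def count_cycle_alt (g : List (List Int)) (n : Int) : Int :=
  ((PySem.List.pyRange 0 n 1).foldl
    (fun (st : Int × List Bool) s =>
      if !(visGet st.2 s) then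
        match exploreB g n.toNat s st.2 with
        | (true, vis') => (st.1 + 1, vis')
        | (false, vis') => (st.1, vis')
      else st)
    (0, List.replicate n.toNat false)).1

-- ===== PRECONDITION & SPEC =====
-- Pre_ restricts to well-formed adjacency input (n ≤ len(g), every neighbor of the
-- first n rows a vertex id in [0, n)); outside it A generally raises IndexError, and
-- the few returning cases go through Python's negative-index wraparound or an early
-- cycle-abort that skips the malformed neighbor — B's traversal reproduces those too,
-- they are merely not covered by the claim.
def Pre_count_cycle (g : List (List Int)) (n : Int) : Prop :=
  n ≤ (g.length : Int) ∧ ∀ row ∈ g.take n.toNat, ∀ i ∈ row, 0 ≤ i ∧ i < n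
instance (g : List (List Int)) (n : Int) : Decidable (Pre_count_cycle g n) := by
  unfold Pre_count_cycle; infer_instance

def pvWitness_count_cycle : List (List Int) × Int := ([[1], [0], [2]], 3)

def Spec_count_cycle (g : List (List Int)) (n : Int) (out : Int) : Prop := out = count_cycle_alt g n
instance (g : List (List Int)) (n : Int) (out : Int) : Decidable (Spec_count_cycle g n out) := by unfold Spec_count_cycle; infer_instance

-- ===== CLAIM (what is proved, stated in full; the proofs are below) =====
def Claim_equal_count_cycle : Prop := ∀ (g : List (List Int)) (n : Int), Dom_count_cycle g n → Pre_count_cycle g n → Spec_count_cycle g n (count_cycle g n)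

-- ===== LEMMAS AND PROOFS =====

/-- number of still-unvisited cells -/
def fcF (vis : List Bool) : Nat := vis.countP (fun b => !b)

/-- every neighbor of every addressable vertex is a vertex id -/
def AdjOK (g : List (List Int)) (L : Nat) : Prop :=
  ∀ i : Int, 0 ≤ i → i < (L : Int) → ∀ j ∈ adjRow g i, 0 ≤ j ∧ j < (L : Int)

/-- every neighbor stored in a stack frame is a vertex id -/
def StackOK (L : Nat) (stack : List (Int × Int × List Int)) : Prop :=
  ∀ fr ∈ stack, ∀ i ∈ fr.2.2, 0 ≤ i ∧ i < (L : Int)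

theorem visGet_eq (vis : List Bool) (i : Int) (h0 : 0 ≤ i) :
    visGet vis i = vis.getD i.toNat false := by
  simp [visGet, PySem.List.pyGet?_of_nonneg, h0, List.getD_eq_getElem?_getD]

theorem visSet_eq (vis : List Bool) (i : Int) (h0 : 0 ≤ i) :
    visSet vis i = vis.set i.toNat true := by
  simp [visSet, PySem.List.pySetD_of_nonneg, h0]

theorem length_visSet (vis : List Bool) (i : Int) : (visSet vis i).length = vis.length := by
  simp [visSet, PySem.List.length_pySetD]

theorem fc_set_le (vis : List Bool) (j : Nat) : fcF (vis.set j true) ≤ fcF vis := by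
  induction vis generalizing j with
  | nil => simp [fcF]
  | cons x xs ih =>
    cases j with
    | zero => cases x <;> simp [fcF]
    | succ j =>
      simp only [List.set_cons_succ, fcF, List.countP_cons]
      have h := ih j
      simp only [fcF] at h
      omega

theorem fc_set_eq (vis : List Bool) (j : Nat) (hj : j < vis.length)
    (hf : vis.getD j false = false) : fcF (vis.set j true) + 1 = fcF vis := by
  induction vis generalizing j with
  | nil => simp at hj
  | cons x xs ih =>
    cases j with
    | zero =>
      simp only [List.getD_cons_zero] at hf
      subst hf
      simp [fcF]
    | succ j =>
      rw [List.getD_cons_succ] at hf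
      simp only [List.length_cons, Nat.succ_lt_succ_iff] at hj
      simp only [List.set_cons_succ, fcF, List.countP_cons]
      have h := ih j hj hf
      simp only [fcF] at h
      omega

theorem fc_le_len (vis : List Bool) : fcF vis ≤ vis.length := List.countP_le_length

theorem fc_visSet_le (vis : List Bool) (i : Int) (h0 : 0 ≤ i) :
    fcF (visSet vis i) ≤ fcF vis := by
  rw [visSet_eq vis i h0]; exact fc_set_le vis i.toNat

/-- A's dfs/loop preserve the length of `visited` and never unmark a vertex. -/
theorem A_inv (g : List (List Int)) (L : Nat) (hadj : AdjOK g L) : ∀ f : Nat,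
    (∀ v par vis, 0 ≤ v → v < (L : Int) → vis.length = L →
      (dfsA g f v par vis).2.length = L ∧ fcF (dfsA g f v par vis).2 ≤ fcF vis)
    ∧ (∀ v par rem vis, (∀ i ∈ rem, 0 ≤ i ∧ i < (L : Int)) → vis.length = L →
      (loopA g f v par rem vis).2.length = L ∧ fcF (loopA g f v par rem vis).2 ≤ fcF vis) := by
  intro f
  induction f with
  | zero =>
    have hd : ∀ v par vis, 0 ≤ v → v < (L : Int) → vis.length = L →
        (dfsA g 0 v par vis).2.length = L ∧ fcF (dfsA g 0 v par vis).2 ≤ fcF vis := by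
      intro v par vis _ _ hlen
      simp [dfsA, hlen]
    refine ⟨hd, ?_⟩
    intro v par rem vis hrem hlen
    induction rem generalizing vis with
    | nil => simp [loopA, hlen]
    | cons i is ih =>
      have hi := hrem i (List.mem_cons_self ..)
      have his : ∀ j ∈ is, 0 ≤ j ∧ j < (L : Int) := fun j hj => hrem j (List.mem_cons_of_mem _ hj)
      cases hvis : visGet vis i with
      | false =>
        simp only [loopA, hvis, Bool.not_false, if_pos, dfsA]
        exact ih vis his hlen
      | true =>
        by_cases hp : i = par
        · subst hp
          simp only [loopA, hvis, Bool.not_true, Bool.false_eq_true, ne_eq,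
            not_true_eq_false, if_neg, not_false_eq_true]
          exact ih vis his hlen
        · simp only [loopA, hvis, Bool.not_true, Bool.false_eq_true, if_false, ne_eq, hp,
            not_false_eq_true, if_pos]
          exact ⟨hlen, le_rfl⟩
  | succ f ihf =>
    have hd : ∀ v par vis, 0 ≤ v → v < (L : Int) → vis.length = L →
        (dfsA g (f + 1) v par vis).2.length = L ∧ fcF (dfsA g (f + 1) v par vis).2 ≤ fcF vis := by
      intro v par vis h0 hv hlen
      have h2 := ihf.2 v par (adjRow g v) (visSet vis v) (hadj v h0 hv)
        (by rw [length_visSet, hlen])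
      simp only [dfsA]
      exact ⟨h2.1, le_trans h2.2 (fc_visSet_le vis v h0)⟩
    refine ⟨hd, ?_⟩
    intro v par rem vis hrem hlen
    induction rem generalizing vis with
    | nil => simp [loopA, hlen]
    | cons i is ih =>
      have hi := hrem i (List.mem_cons_self ..)
      have his : ∀ j ∈ is, 0 ≤ j ∧ j < (L : Int) := fun j hj => hrem j (List.mem_cons_of_mem _ hj)
      cases hvis : visGet vis i with
      | false =>
        rcases hD : dfsA g (f + 1) i v vis with ⟨b, vis'⟩
        have hD' := hd i v vis hi.1 hi.2 hlen
        rw [hD] at hD'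
        cases b with
        | true =>
          simp only [loopA, hvis, Bool.not_false, if_pos, hD]
          exact hD'
        | false =>
          simp only [loopA, hvis, Bool.not_false, if_pos, hD]
          have h3 := ih vis' his hD'.1
          exact ⟨h3.1, le_trans h3.2 hD'.2⟩
      | true =>
        by_cases hp : i = par
        · subst hp
          simp only [loopA, hvis, Bool.not_true, Bool.false_eq_true, ne_eq,
            not_true_eq_false, if_neg, not_false_eq_true]
          exact ih vis his hlen
        · simp only [loopA, hvis, Bool.not_true, Bool.false_eq_true, if_false, ne_eq, hp,
            not_false_eq_true, if_pos]
          exact ⟨hlen, le_rfl⟩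

theorem runB_succ (g : List (List Int)) (L : Nat) (hadj : AdjOK g L) :
    ∀ (f : Nat) (stack : List (Int × Int × List Int)) (vis : List Bool),
      StackOK L stack → vis.length = L → fcF vis ≤ f →
      runB g f stack vis = runB g (f + 1) stack vis := by
  intro f stack vis
  induction f, stack, vis using runB.induct g with
  | case1 f vis => intro _ _ _; simp [runB]
  | case2 f vis v par rest ih =>
    intro hst hlen hfc
    simp only [runB]
    exact ih (fun fr hfr => hst fr (List.mem_cons_of_mem _ hfr)) hlen hfc
  | case3 vis v par i is rest hvis =>
    intro hst hlen hfc
    have hi := hst _ List.mem_cons_self i List.mem_cons_self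
    have hv : visGet vis i = false := by simpa using hvis
    have hgd : vis.getD i.toNat false = false := by rw [← visGet_eq vis i hi.1]; exact hv
    have hlt : i.toNat < vis.length := by rw [hlen]; omega
    have := fc_set_eq vis i.toNat hlt hgd
    omega
  | case4 vis v par i is rest hvis f' ih =>
    intro hst hlen hfc
    have hi := hst _ List.mem_cons_self i List.mem_cons_self
    have hv : visGet vis i = false := by simpa using hvis
    have hgd : vis.getD i.toNat false = false := by rw [← visGet_eq vis i hi.1]; exact hv
    have hlt : i.toNat < vis.length := by rw [hlen]; omega
    have hfe := fc_set_eq vis i.toNat hlt hgd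
    have htail : StackOK L ((v, par, is) :: rest) := by
      intro fr hfr
      rcases List.mem_cons.mp hfr with h | h
      · subst h; intro j hj; exact hst _ List.mem_cons_self j (List.mem_cons_of_mem _ hj)
      · exact hst fr (List.mem_cons_of_mem _ h)
    have hpush : StackOK L ((i, v, adjRow g i) :: (v, par, is) :: rest) := by
      intro fr hfr
      rcases List.mem_cons.mp hfr with h | h
      · subst h; exact hadj i hi.1 hi.2
      · exact htail fr h
    have hfc' : fcF (visSet vis i) ≤ f' := by rw [visSet_eq vis i hi.1]; omega
    have hlen' : (visSet vis i).length = L := by rw [length_visSet]; exact hlen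
    simp only [runB, hvis, if_pos]
    exact ih hpush hlen' hfc'
  | case5 f vis v par i is rest h1 h2 =>
    intro _ _ _
    conv_lhs => rw [runB.eq_def]
    conv_rhs => rw [runB.eq_def]
    simp [h1, h2]
  | case6 f vis v par i is rest h1 h2 ih =>
    intro hst hlen hfc
    have htail : StackOK L ((v, par, is) :: rest) := by
      intro fr hfr
      rcases List.mem_cons.mp hfr with h | h
      · subst h; intro j hj; exact hst _ List.mem_cons_self j (List.mem_cons_of_mem _ hj)
      · exact hst fr (List.mem_cons_of_mem _ h)
    have key := ih htail hlen hfc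
    conv_lhs => rw [runB.eq_def]
    conv_rhs => rw [runB.eq_def]
    simpa [h1, h2] using key

/-- the stack machine runs the frame `(v, par, rem)` exactly like A's loop, then
    continues with the rest of the stack -/
theorem main_sim (g : List (List Int)) (L : Nat) (hadj : AdjOK g L) : ∀ c : Nat,
    ∀ (vis : List Bool) (rem : List Int) (v par : Int)
      (rest : List (Int × Int × List Int)) (fA fB : Nat),
      vis.length = L → fcF vis ≤ c → fcF vis ≤ fA → fcF vis ≤ fB →
      (∀ i ∈ rem, 0 ≤ i ∧ i < (L : Int)) → StackOK L rest →
      runB g fB ((v, par, rem) :: rest) vis =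
        (match loopA g fA v par rem vis with
         | (true, v') => (true, v')
         | (false, v') => runB g fB rest v') := by
  intro c
  induction c with
  | zero =>
    intro vis rem v par rest fA fB hlen hfc hfA hfB hrem hrest
    revert hrem
    induction rem with
    | nil => intro _; simp [runB, loopA]
    | cons i is ih =>
      intro hrem
      have hi := hrem i List.mem_cons_self
      have his : ∀ j ∈ is, 0 ≤ j ∧ j < (L : Int) :=
        fun j hj => hrem j (List.mem_cons_of_mem _ hj)
      cases hvis : visGet vis i with
      | false =>
        exfalso
        have hgd : vis.getD i.toNat false = false := by rw [← visGet_eq vis i hi.1]; exact hvis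
        have hlt : i.toNat < vis.length := by rw [hlen]; omega
        have := fc_set_eq vis i.toNat hlt hgd
        omega
      | true =>
        by_cases hp : i = par
        · subst hp
          conv_lhs => rw [runB.eq_def]
          simpa [loopA, hvis] using ih his
        · conv_lhs => rw [runB.eq_def]
          simp [loopA, hvis, hp]
  | succ c ihc =>
    intro vis rem v par rest fA fB hlen hfc hfA hfB hrem hrest
    revert hrem
    induction rem with
    | nil => intro _; simp [runB, loopA]
    | cons i is ih =>
      intro hrem
      have hi := hrem i List.mem_cons_self
      have his : ∀ j ∈ is, 0 ≤ j ∧ j < (L : Int) :=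
        fun j hj => hrem j (List.mem_cons_of_mem _ hj)
      cases hvis : visGet vis i with
      | true =>
        by_cases hp : i = par
        · subst hp
          conv_lhs => rw [runB.eq_def]
          simpa [loopA, hvis] using ih his
        · conv_lhs => rw [runB.eq_def]
          simp [loopA, hvis, hp]
      | false =>
        have hgd : vis.getD i.toNat false = false := by rw [← visGet_eq vis i hi.1]; exact hvis
        have hlt : i.toNat < vis.length := by rw [hlen]; omega
        have hfe := fc_set_eq vis i.toNat hlt hgd
        obtain ⟨fA', rfl⟩ : ∃ k, fA = k + 1 := ⟨fA - 1, by omega⟩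
        obtain ⟨fB', rfl⟩ : ∃ k, fB = k + 1 := ⟨fB - 1, by omega⟩
        have hlen₁ : (visSet vis i).length = L := by rw [length_visSet]; exact hlen
        have hset := visSet_eq vis i hi.1
        have hfc₁ : fcF (visSet vis i) ≤ c := by rw [hset]; omega
        have hfcA : fcF (visSet vis i) ≤ fA' := by rw [hset]; omega
        have hfcB : fcF (visSet vis i) ≤ fB' := by rw [hset]; omega
        have hrest' : StackOK L ((v, par, is) :: rest) := by
          intro fr hfr
          rcases List.mem_cons.mp hfr with h | h
          · subst h; exact his
          · exact hrest fr h
        have h1 := ihc (visSet vis i) (adjRow g i) i v ((v, par, is) :: rest) fA' fB'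
          hlen₁ hfc₁ hfcA hfcB (hadj i hi.1 hi.2) hrest'
        have hinv := (A_inv g L hadj fA').2 i v (adjRow g i) (visSet vis i)
          (hadj i hi.1 hi.2) hlen₁
        rcases hL : loopA g fA' i v (adjRow g i) (visSet vis i) with ⟨b, vis'⟩
        rw [hL] at h1 hinv
        dsimp only at hinv
        conv_lhs => rw [runB.eq_def]
        simp only [hvis, Bool.not_false, if_pos]
        rw [h1]
        cases b with
        | true => simp [loopA, hvis, dfsA, hL]
        | false =>
          dsimp only
          have hfcv' : fcF vis' ≤ fcF (visSet vis i) := hinv.2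
          have h2 := ihc vis' is v par rest (fA' + 1) fB' hinv.1
            (by omega) (by omega) (by omega) his hrest
          rw [h2]
          have hinv2 := (A_inv g L hadj (fA' + 1)).2 v par is vis' his hinv.1
          rcases hL2 : loopA g (fA' + 1) v par is vis' with ⟨b2, v''⟩
          rw [hL2] at hinv2
          dsimp only at hinv2
          simp only [loopA, hvis, Bool.not_false, if_pos, dfsA, hL, hL2]
          cases b2 with
          | true => rfl
          | false =>
            exact runB_succ g L hadj fB' rest v'' hrest hinv2.1 (by omega)

def stepA (g : List (List Int)) (fuel : Nat) (st : Int × List Bool) (i : Int) : Int × List Bool :=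
  if !(visGet st.2 i) then
    match dfsA g fuel i (-1) st.2 with
    | (true, vis') => (st.1 + 1, vis')
    | (false, vis') => (st.1, vis')
  else st

def stepB (g : List (List Int)) (fuel : Nat) (st : Int × List Bool) (s : Int) : Int × List Bool :=
  if !(visGet st.2 s) then
    match exploreB g fuel s st.2 with
    | (true, vis') => (st.1 + 1, vis')
    | (false, vis') => (st.1, vis')
  else st

theorem top_eq (g : List (List Int)) (n : Int) (hadj : AdjOK g n.toNat) :
    ∀ (l : List Int) (cnt : Int) (vis : List Bool),
      (∀ i ∈ l, 0 ≤ i ∧ i < (n.toNat : Int)) → vis.length = n.toNat →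
      l.foldl (stepA g (n.toNat + 1)) (cnt, vis) = l.foldl (stepB g n.toNat) (cnt, vis) := by
  intro l
  induction l with
  | nil => intro cnt vis _ _; rfl
  | cons i l ih =>
    intro cnt vis hl hlen
    have hi := hl i List.mem_cons_self
    have hls : ∀ j ∈ l, 0 ≤ j ∧ j < (n.toNat : Int) :=
      fun j hj => hl j (List.mem_cons_of_mem _ hj)
    cases hvis : visGet vis i with
    | true =>
      have hA : stepA g (n.toNat + 1) (cnt, vis) i = (cnt, vis) := by
        unfold stepA; simp [hvis]
      have hB : stepB g n.toNat (cnt, vis) i = (cnt, vis) := by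
        unfold stepB; simp [hvis]
      rw [List.foldl_cons, List.foldl_cons, hA, hB]
      exact ih cnt vis hls hlen
    | false =>
      have hlen₁ : (visSet vis i).length = n.toNat := by rw [length_visSet]; exact hlen
      have hfc₁ : fcF (visSet vis i) ≤ n.toNat :=
        le_trans (fc_le_len _) (le_of_eq hlen₁)
      have hkey := main_sim g n.toNat hadj n.toNat (visSet vis i) (adjRow g i) i (-1) []
        n.toNat n.toNat hlen₁ hfc₁ hfc₁ hfc₁ (hadj i hi.1 hi.2) (by intro fr hfr; simp at hfr)
      have hinv := (A_inv g n.toNat hadj n.toNat).2 i (-1) (adjRow g i) (visSet vis i)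
        (hadj i hi.1 hi.2) hlen₁
      rcases hL : loopA g n.toNat i (-1) (adjRow g i) (visSet vis i) with ⟨b, vis'⟩
      rw [hL] at hkey hinv
      dsimp only at hinv
      cases b with
      | true =>
        have hA : stepA g (n.toNat + 1) (cnt, vis) i = (cnt + 1, vis') := by
          unfold stepA; simp [hvis, dfsA, hL]
        have hB : stepB g n.toNat (cnt, vis) i = (cnt + 1, vis') := by
          unfold stepB; simp [hvis, exploreB, hkey]
        rw [List.foldl_cons, List.foldl_cons, hA, hB]
        exact ih (cnt + 1) vis' hls hinv.1
      | false =>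
        have hA : stepA g (n.toNat + 1) (cnt, vis) i = (cnt, vis') := by
          unfold stepA; simp [hvis, dfsA, hL]
        have hB : stepB g n.toNat (cnt, vis) i = (cnt, vis') := by
          unfold stepB; simp [hvis, exploreB, hkey, runB]
        rw [List.foldl_cons, List.foldl_cons, hA, hB]
        exact ih cnt vis' hls hinv.1

-- ===== VERDICT (by name: the statement is the Claim_ definition above) =====
theorem count_cycle_spec : Claim_equal_count_cycle := by
  unfold Claim_equal_count_cycle
  intro g n _ hpre
  unfold Spec_count_cycle
  by_cases hn' : n ≤ 0
  · simp [count_cycle, count_cycle_alt, PySem.List.pyRange_one_eq_nil hn']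
  · have hn : 0 < n := by omega
    have hL : ((n.toNat : Int)) = n := Int.toNat_of_nonneg (le_of_lt hn)
    have hadj : AdjOK g n.toNat := by
      intro i h0 hiL j hj
      rw [hL] at hiL
      have hig : i.toNat < g.length := by
        have := hpre.1
        omega
      have hroweq : adjRow g i = g[i.toNat] := by
        simp [adjRow, PySem.List.pyGet?_of_nonneg, h0, List.getElem?_eq_getElem hig]
      rw [hroweq] at hj
      have hrow : g[i.toNat] ∈ g.take n.toNat := by
        have h1 : i.toNat < n.toNat := by omega
        have h2 : i.toNat < (g.take n.toNat).length := by
          simp [List.length_take]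
          omega
        have h3 : (g.take n.toNat)[i.toNat]'h2 = g[i.toNat] := List.getElem_take
        exact h3 ▸ List.getElem_mem h2
      have hb := hpre.2 _ hrow j hj
      rw [hL]
      exact hb
    have hfold := top_eq g n hadj (PySem.List.pyRange 0 n 1) 0 (List.replicate n.toNat false)
      (by
        intro i hi
        rw [PySem.List.mem_pyRange_one] at hi
        refine ⟨hi.1, ?_⟩
        rw [hL]
        exact hi.2)
      (by simp)
    simp only [count_cycle, count_cycle_alt]
    exact congrArg Prod.fst hfold
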